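-- pv_equiv track=rewrite | github.com/wsadzanie2/WordToExcel | main.py | get_spaces_between_words
-- ===== SOURCE A (Python) =====
-- def get_spaces_between_words(line):
--     counting_spaces = False
--     for index, char in enumerate(line):
--         if counting_spaces:
--             if char != ' ':
--                 return index
--         elif char == ' ':
--             counting_spaces = True
--
--     return 0
-- ===== SOURCE B (Python) =====
-- def get_spaces_between_words(line):
--     _, sep, rest = line.partition(' ')
--     tail = rest.lstrip(' ')
--     if sep and tail:
--         return len(line) - len(tail)
--     return 0
-- ===== Notes on version B (the rewrite author's own statement) =====
-- stated objective: simpler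
-- what changed: Replaced the index-tracking boolean state machine with loop-free length arithmetic: partition at the first space, lstrip the remaining spaces, and return len(line) - len(tail) (0 when there is no space or the tail is empty); the C-level str primitives replace the per-character Python loop.
import Mathlib
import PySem

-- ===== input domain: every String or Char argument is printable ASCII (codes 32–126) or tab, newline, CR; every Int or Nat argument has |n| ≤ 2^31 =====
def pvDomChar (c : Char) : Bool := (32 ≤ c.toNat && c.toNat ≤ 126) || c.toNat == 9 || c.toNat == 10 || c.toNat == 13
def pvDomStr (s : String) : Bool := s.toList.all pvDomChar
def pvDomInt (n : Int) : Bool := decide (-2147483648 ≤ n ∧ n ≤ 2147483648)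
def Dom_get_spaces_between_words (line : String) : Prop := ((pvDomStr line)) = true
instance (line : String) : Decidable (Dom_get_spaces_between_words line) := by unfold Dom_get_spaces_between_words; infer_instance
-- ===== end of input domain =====

-- B replaces A's index-tracking boolean state machine with loop-free length arithmetic
-- (partition at the first space, lstrip, len(line) - len(tail)); objective: simpler.

-- ===== PORT A =====
-- A's for-loop with the `counting_spaces` flag, index carried explicitly (Python's enumerate)
def goA : List Char → Nat → Bool → Nat
  | [], _, _ => 0
  | c :: rest, i, counting =>
    if counting then
      if c ≠ ' ' then i else goA rest (i + 1) counting
    else if c = ' ' then goA rest (i + 1) true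
    else goA rest (i + 1) false

def get_spaces_between_words (line : String) : Int :=
  (goA line.toList 0 false : Int)

-- ===== PORT B =====
-- Source B: line.partition(' ') — (before, whether a space occurs, after)
def partitionSp (cs : List Char) : List Char × Bool × List Char :=
  if ' ' ∈ cs then (cs.takeWhile (· ≠ ' '), true, (cs.dropWhile (· ≠ ' ')).drop 1)
  else (cs, false, [])

def get_spaces_between_words_alt (line : String) : Int :=
  let cs := line.toList
  let p := partitionSp cs
  let tail := p.2.2.dropWhile (· = ' ')   -- rest.lstrip(' ')
  if p.2.1 && !tail.isEmpty then ((cs.length : Int) - tail.length) else 0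

-- ===== PRECONDITION & SPEC =====
def Spec_get_spaces_between_words (line : String) (out : Int) : Prop := out = get_spaces_between_words_alt line
instance (line : String) (out : Int) : Decidable (Spec_get_spaces_between_words line out) := by unfold Spec_get_spaces_between_words; infer_instance

-- ===== CLAIM (what is proved, stated in full; the proofs are below) =====
def Claim_equal_get_spaces_between_words : Prop := ∀ (line : String), Dom_get_spaces_between_words line → Spec_get_spaces_between_words line (get_spaces_between_words line)

-- ===== LEMMAS AND PROOFS =====

-- A in `counting` state over `post`, at index k: returns k + (leading spaces of post),
-- or 0 if post is all spaces.
theorem goA_true (post : List Char) (k : Nat) :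
    goA post k true =
      if (post.dropWhile (· = ' ')).length = 0 then 0
      else k + (post.length - (post.dropWhile (· = ' ')).length) := by
  induction post generalizing k with
  | nil => simp [goA]
  | cons c rest ih =>
    have hle : (rest.dropWhile (· = ' ')).length ≤ rest.length := List.length_dropWhile_le _ _
    by_cases hc : c = ' '
    · have e : goA (c :: rest) k true = goA rest (k + 1) true := by simp [goA, hc]
      have hd : (c :: rest).dropWhile (· = ' ') = rest.dropWhile (· = ' ') := by
        simp [List.dropWhile, hc]
      rw [e, ih (k + 1), hd]
      simp only [List.length_cons]
      split_ifs <;> omega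
    · have e : goA (c :: rest) k true = k := by simp [goA, hc]
      have hd : (c :: rest).dropWhile (· = ' ') = c :: rest := by
        simp [List.dropWhile, hc]
      rw [e, hd]
      simp only [List.length_cons]
      rw [if_neg (by omega)]
      omega

-- A in scanning state over cs at index i, expressed by B's quantities shifted by i.
theorem goA_false (cs : List Char) (i : Nat) :
    goA cs i false =
      if ' ' ∈ cs then
        (if ((((cs.dropWhile (· ≠ ' ')).drop 1).dropWhile (· = ' ')).length = 0) then 0
         else i + (cs.length - (((cs.dropWhile (· ≠ ' ')).drop 1).dropWhile (· = ' ')).length))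
      else 0 := by
  induction cs generalizing i with
  | nil => simp [goA]
  | cons c rest ih =>
    by_cases hc : c = ' '
    · have e : goA (c :: rest) i false = goA rest (i + 1) true := by simp [goA, hc]
      have hmem : ' ' ∈ c :: rest := by simp [hc]
      have hd : ((c :: rest).dropWhile (· ≠ ' ')).drop 1 = rest := by
        simp [List.dropWhile, hc]
      have hle : (rest.dropWhile (· = ' ')).length ≤ rest.length := List.length_dropWhile_le _ _
      rw [e, goA_true rest (i + 1), if_pos hmem, hd]
      simp only [List.length_cons]
      split_ifs <;> omega
    · have e : goA (c :: rest) i false = goA rest (i + 1) false := by simp [goA, hc]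
      rw [e, ih (i + 1)]
      by_cases hm : ' ' ∈ rest
      · have hmem : ' ' ∈ c :: rest := by simp [hm]
        have hd : (c :: rest).dropWhile (· ≠ ' ') = rest.dropWhile (· ≠ ' ') := by
          simp [List.dropWhile, hc]
        rw [if_pos hm, if_pos hmem, hd]
        simp only [List.length_cons]
        have h1 : (((rest.dropWhile (· ≠ ' ')).drop 1).dropWhile (· = ' ')).length ≤ rest.length := by
          calc (((rest.dropWhile (· ≠ ' ')).drop 1).dropWhile (· = ' ')).length
              ≤ ((rest.dropWhile (· ≠ ' ')).drop 1).length := List.length_dropWhile_le _ _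
            _ ≤ (rest.dropWhile (· ≠ ' ')).length := by simp
            _ ≤ rest.length := List.length_dropWhile_le _ _
        split_ifs <;> omega
      · have hmem : ¬ ' ' ∈ c :: rest := by simp [hm, Ne.symm hc]
        rw [if_neg hm, if_neg hmem]

-- ===== VERDICT (by name: the statement is the Claim_ definition above) =====
theorem get_spaces_between_words_spec : Claim_equal_get_spaces_between_words := by
  intro line _
  unfold Spec_get_spaces_between_words get_spaces_between_words get_spaces_between_words_alt partitionSp
  rw [goA_false line.toList 0]
  by_cases hm : ' ' ∈ line.toList
  · simp only [hm, if_true]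
    set tail := ((line.toList.dropWhile (· ≠ ' ')).drop 1).dropWhile (· = ' ') with htail
    have h1 : tail.length ≤ line.toList.length := by
      calc tail.length ≤ ((line.toList.dropWhile (· ≠ ' ')).drop 1).length := List.length_dropWhile_le _ _
        _ ≤ (line.toList.dropWhile (· ≠ ' ')).length := by simp
        _ ≤ line.toList.length := List.length_dropWhile_le _ _
    by_cases ht : tail = []
    · simp [ht]
    · have hlen : ¬ tail.length = 0 := by simpa [List.length_eq_zero_iff] using ht
      have hne : tail.isEmpty = false := by simpa [List.isEmpty_iff] using ht
      rw [if_neg hlen]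
      simp only [hne, Bool.not_false, Bool.and_true, if_true]
      push_cast
      omega
  · simp [hm]
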